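-- pv_equiv track=rewrite | github.com/ijnim1121/BaekjoonHub | 백준/Silver/14889. 스타트와 링크/스타트와 링크.py | find_min_ability_diff
-- ===== SOURCE A (Python) =====
-- from itertools import combinations
--
-- def calculate_team_ability(team, ability_map):
--     ability = 0
--     # 팀의 모든 사람들 간의 능력치 합을 계산
--     for i in range(len(team)):
--         for j in range(i + 1, len(team)):
--             ability += ability_map[team[i]][team[j]] + ability_map[team[j]][team[i]]
--     return ability
--
-- def find_min_ability_diff(n, ability_map):
--     players = [i for i in range(n)]
--     min_diff = float('inf')
--
--     # N명 중 N//2명을 뽑는 모든 조합을 구한다 (한 팀 구성)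
--     for team1 in combinations(players, n // 2):
--         team1 = list(team1)
--         # 팀1에 속하지 않는 나머지 사람들로 팀2를 구성
--         team2 = list(set(players) - set(team1))
--
--         # 각 팀의 능력치를 계산
--         team1_ability = calculate_team_ability(team1, ability_map)
--         team2_ability = calculate_team_ability(team2, ability_map)
--
--         # 두 팀 능력치 차이 계산
--         diff = abs(team1_ability - team2_ability)
--         # 최소 차이 갱신
--         min_diff = min(min_diff, diff)
--
--     return min_diff
--
-- ability_map = []  # 능력치 배열을 저장할 리스트
-- ===== SOURCE B (Python) =====
-- def find_min_ability_diff(n, ability_map):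
--     # Backtracking DFS: assign each player to team1 or team2 (sizes capped at
--     # n//2 and n - n//2), maintaining each team's ability incrementally.
--     k = n // 2
--     best = None
--
--     def dfs(i, team1, team2, a1, a2):
--         nonlocal best
--         if i == n:
--             d = abs(a1 - a2)
--             if best is None or d < best:
--                 best = d
--             return
--         if len(team1) < k:
--             gain = sum(ability_map[i][q] + ability_map[q][i] for q in team1)
--             team1.append(i)
--             dfs(i + 1, team1, team2, a1 + gain, a2)
--             team1.pop()
--         if len(team2) < n - k:
--             gain = sum(ability_map[i][q] + ability_map[q][i] for q in team2)
--             team2.append(i)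
--             dfs(i + 1, team1, team2, a1, a2 + gain)
--             team2.pop()
--
--     dfs(0, [], [], 0, 0)
--     return best
-- ===== Notes on version B (the rewrite author's own statement) =====
-- stated objective: faster
-- what changed: Replaces the itertools.combinations enumeration with per-leaf O(n^2) ability recomputation and set-difference by a recursive include/exclude backtracking DFS that caps both team sizes and maintains each team's ability incrementally (O(n) work per added player).
import Mathlib
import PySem

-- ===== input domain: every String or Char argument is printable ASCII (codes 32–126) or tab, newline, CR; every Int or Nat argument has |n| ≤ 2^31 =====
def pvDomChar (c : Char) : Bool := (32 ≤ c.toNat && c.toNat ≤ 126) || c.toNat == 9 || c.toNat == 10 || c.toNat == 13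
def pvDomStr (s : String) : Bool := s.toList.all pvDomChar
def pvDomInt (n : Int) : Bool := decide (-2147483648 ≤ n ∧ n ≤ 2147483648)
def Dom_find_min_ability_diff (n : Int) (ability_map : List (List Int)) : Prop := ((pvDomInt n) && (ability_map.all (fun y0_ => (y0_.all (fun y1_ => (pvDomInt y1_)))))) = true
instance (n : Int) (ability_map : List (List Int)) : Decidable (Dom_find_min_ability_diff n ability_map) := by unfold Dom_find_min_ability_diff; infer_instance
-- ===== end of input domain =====

-- B replaces A's combinations enumeration (with per-leaf ability recomputation and
-- set difference) by a size-capped include/exclude backtracking DFS that maintains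
-- each team's ability incrementally (objective: faster, O(n) instead of O(n^2) work
-- per partition).


-- ===== PORT A =====

-- ability_map[p][q]: out-of-range indices raise IndexError in Python; such inputs are
-- excluded by Pre_, so the defaults are never used there.
def pvCell (m : List (List Int)) (p q : Int) : Int :=
  PySem.List.pyGetD (PySem.List.pyGetD m p []) q 0

-- itertools.combinations(l, j), hand-ported exactly (lexicographic order).
def pvCombosA : List Int → Nat → List (List Int)
  | _, 0 => [[]]
  | [], _ + 1 => []
  | x :: xs, j + 1 => (pvCombosA xs j).map (fun t => x :: t) ++ pvCombosA xs (j + 1)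

-- calculate_team_ability: the literal double loop; team indices i,j are always in
-- range (they come from range(len(team))), so getD is exact here.
def pvCalcTeamA (team : List Int) (m : List (List Int)) : Int :=
  (List.range team.length).foldl (fun ab i =>
    (List.range' (i + 1) (team.length - (i + 1))).foldl (fun ab2 j =>
      ab2 + (pvCell m (team.getD i 0) (team.getD j 0) + pvCell m (team.getD j 0) (team.getD i 0))) ab) 0

-- min(min_diff, diff) where min_diff starts as float('inf') (modelled as none).
def pvMinInf (acc : Option Int) (d : Int) : Option Int :=
  some (match acc with | none => d | some b => min b d)

def find_min_ability_diff (n : Int) (ability_map : List (List Int)) : Int :=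
  let players := PySem.List.pyRange 0 n 1
  let k := PySem.Int.floordiv n 2
  -- combinations raises ValueError when n // 2 < 0 (i.e. n < 0): outside Pre_
  let cs := if k < 0 then [] else pvCombosA players k.toNat
  let best := cs.foldl (fun acc t1 =>
    -- team2 = list(set(players) - set(team1)); CPython iterates this set of small
    -- contiguous ints in ascending order, hence the filter; the team ability is a sum
    -- over unordered pairs, so the value is order-independent anyway
    let t2 := players.filter (fun p => !(t1.contains p))
    pvMinInf acc (|pvCalcTeamA t1 ability_map - pvCalcTeamA t2 ability_map|)) none
  best.getD 0  -- best = none (Python: float('inf')) only when n < 0: outside Pre_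

-- ===== PORT B =====

-- sum(ability_map[i][q] + ability_map[q][i] for q in team)
def pvGain (m : List (List Int)) (p : Int) (team : List Int) : Int :=
  team.foldl (fun s q => s + (pvCell m p q + pvCell m q p)) 0

-- the recursive dfs of Source B; fuel = n - i on every call path, so the fuel-exhausted
-- branch (returning best unchanged) is unreachable while i < n
def pvDfs (m : List (List Int)) (n k : Int) :
    Nat → Int → List Int → List Int → Int → Int → Option Int → Option Int
  | fuel, i, t1, t2, a1, a2, best =>
    if i = n then
      match best with
      | none => some (|a1 - a2|)
      | some b => if |a1 - a2| < b then some (|a1 - a2|) else some b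
    else
      match fuel with
      | 0 => best
      | fuel' + 1 =>
        let best1 := if (t1.length : Int) < k then
            pvDfs m n k fuel' (i + 1) (t1 ++ [i]) t2 (a1 + pvGain m i t1) a2 best
          else best
        if (t2.length : Int) < n - k then
          pvDfs m n k fuel' (i + 1) t1 (t2 ++ [i]) a1 (a2 + pvGain m i t2) best1
        else best1

def find_min_ability_diff_alt (n : Int) (ability_map : List (List Int)) : Int :=
  let k := PySem.Int.floordiv n 2
  (pvDfs ability_map n k n.toNat 0 [] [] 0 0 none).getD 0
  -- best = none (Python B returns None) only when n < 0: outside Pre_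

-- ===== PRECONDITION & SPEC =====

-- Exactly where Python A returns normally: n < 0 raises ValueError (combinations with
-- negative r); for n ≥ 3 every pair of distinct players is co-teamed in some partition,
-- so A raises IndexError unless rows 0..n-2 have length ≥ n and row n-1 (only ever
-- indexed up to n-2) has length ≥ n-1; for n ≤ 2 no cell is ever read.
def Pre_find_min_ability_diff (n : Int) (ability_map : List (List Int)) : Prop :=
  0 ≤ n ∧ (3 ≤ n → (n ≤ (ability_map.length : Int) ∧
    ∀ i ∈ List.range n.toNat,
      ((i : Int) < n - 1 → n ≤ ((ability_map.getD i []).length : Int)) ∧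
      n - 1 ≤ ((ability_map.getD i []).length : Int)))
instance (n : Int) (ability_map : List (List Int)) : Decidable (Pre_find_min_ability_diff n ability_map) := by
  unfold Pre_find_min_ability_diff; infer_instance

def pvWitness_find_min_ability_diff : Int × List (List Int) :=
  (4, [[0, 1, 2, 3], [4, 0, 1, 2], [3, 4, 0, 1], [2, 3, 4, 0]])

def Spec_find_min_ability_diff (n : Int) (ability_map : List (List Int)) (out : Int) : Prop := out = find_min_ability_diff_alt n ability_map
instance (n : Int) (ability_map : List (List Int)) (out : Int) : Decidable (Spec_find_min_ability_diff n ability_map out) := by unfold Spec_find_min_ability_diff; infer_instance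

-- ===== CLAIM (what is proved, stated in full; the proofs are below) =====
def Claim_equal_find_min_ability_diff : Prop := ∀ (n : Int) (ability_map : List (List Int)), Dom_find_min_ability_diff n ability_map → Pre_find_min_ability_diff n ability_map → Spec_find_min_ability_diff n ability_map (find_min_ability_diff n ability_map)

-- ===== LEMMAS AND PROOFS =====

-- [i, i+1, …, i+r-1]
def pvRangeI : Int → Nat → List Int
  | _, 0 => []
  | i, r + 1 => i :: pvRangeI (i + 1) r

-- all ways to distribute players i, i+1, …, i+r-1 over the two teams, include-first
def pvSplits : Int → Nat → List (List Int × List Int)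
  | _, 0 => [([], [])]
  | i, r + 1 =>
      (pvSplits (i + 1) r).map (fun s => (i :: s.1, s.2)) ++
      (pvSplits (i + 1) r).map (fun s => (s.1, i :: s.2))

theorem pvRangeI_eq_pyRange : ∀ (r : Nat) (a : Int),
    PySem.List.pyRange a (a + r) 1 = pvRangeI a r := by
  intro r
  induction r with
  | zero => intro a; simp [pvRangeI, PySem.List.pyRange_one_eq_nil]
  | succ r ih =>
      intro a
      rw [PySem.List.pyRange_one_cons (by push_cast; omega)]
      have : a + ((r : Int) + 1) = (a + 1) + r := by ring
      push_cast
      rw [this, ih (a + 1)]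
      rfl

theorem mem_pvRangeI : ∀ (r : Nat) (i x : Int), x ∈ pvRangeI i r → i ≤ x ∧ x < i + r := by
  intro r
  induction r with
  | zero => intro i x h; simp [pvRangeI] at h
  | succ r ih =>
      intro i x h
      rcases (by simpa [pvRangeI] using h : x = i ∨ x ∈ pvRangeI (i + 1) r) with h | h
      · subst h; constructor <;> (push_cast; omega)
      · have := ih (i + 1) x h
        push_cast at this ⊢
        constructor <;> omega

theorem pvSplits_len : ∀ (r : Nat) (i : Int) (s : List Int × List Int),
    s ∈ pvSplits i r → s.1.length + s.2.length = r := by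
  intro r
  induction r with
  | zero => intro i s h; simp [pvSplits] at h; simp [h]
  | succ r ih =>
      intro i s h
      simp only [pvSplits, List.mem_append, List.mem_map] at h
      rcases h with ⟨t, ht, rfl⟩ | ⟨t, ht, rfl⟩ <;>
        (have := ih (i + 1) t ht; simp; omega)

theorem mem_pvCombosA : ∀ (l : List Int) (j : Nat) (S : List Int) (x : Int),
    S ∈ pvCombosA l j → x ∈ S → x ∈ l := by
  intro l
  induction l with
  | nil =>
      intro j S x hS hx
      cases j with
      | zero => simp [pvCombosA] at hS; simp [hS] at hx
      | succ j => simp [pvCombosA] at hS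
  | cons y ys ih =>
      intro j S x hS hx
      cases j with
      | zero => simp [pvCombosA] at hS; simp [hS] at hx
      | succ j =>
          simp only [pvCombosA, List.mem_append, List.mem_map] at hS
          rcases hS with ⟨t, ht, rfl⟩ | hS
          · rcases (by simpa using hx : x = y ∨ x ∈ t) with rfl | hx
            · exact List.mem_cons_self
            · exact List.mem_cons_of_mem _ (ih j t x ht hx)
          · exact List.mem_cons_of_mem _ (ih _ S x hS hx)

theorem pvCalcTeamA_nil (m : List (List Int)) : pvCalcTeamA [] m = 0 := by
  simp [pvCalcTeamA]

theorem pvCalc_sum (team : List Int) (m : List (List Int)) :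
    pvCalcTeamA team m = ((List.range team.length).map (fun i =>
      ((List.range' (i + 1) (team.length - (i + 1))).map (fun j =>
        pvCell m (team.getD i 0) (team.getD j 0) + pvCell m (team.getD j 0) (team.getD i 0))).sum)).sum := by
  unfold pvCalcTeamA
  simp only [PySem.List.foldl_add, zero_add]

theorem pvGain_sum (m : List (List Int)) (p : Int) (t : List Int) :
    pvGain m p t = (t.map (fun q => pvCell m p q + pvCell m q p)).sum := by
  unfold pvGain
  rw [PySem.List.foldl_add]
  simp

theorem pvMapRangeGetD : ∀ (t : List Int) (f : Int → Int),
    (List.range t.length).map (fun i => f (t.getD i 0)) = t.map f := by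
  intro t
  induction t with
  | nil => intro f; simp
  | cons x xs ih =>
      intro f
      simp only [List.length_cons, List.range_succ_eq_map, List.map_cons, List.map_map,
        List.getD_cons_zero]
      congr 1
      have h : ((fun i => f ((x :: xs).getD i 0)) ∘ Nat.succ) = fun i => f (xs.getD i 0) := by
        funext i; simp
      rw [h, ih f]

theorem pvCalcTeamA_append (t : List Int) (p : Int) (m : List (List Int)) :
    pvCalcTeamA (t ++ [p]) m = pvCalcTeamA t m + pvGain m p t := by
  rw [pvCalc_sum, pvCalc_sum, pvGain_sum]
  have hlen : (t ++ [p]).length = t.length + 1 := by simp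
  rw [hlen, List.range_succ, List.map_append, List.sum_append]
  have hgetL : (t ++ [p]).getD t.length 0 = p := by
    rw [List.getD_append_right _ _ _ _ (le_refl _)]
    simp
  have hlast : ([t.length].map (fun i =>
      ((List.range' (i + 1) (t.length + 1 - (i + 1))).map (fun j =>
        pvCell m ((t ++ [p]).getD i 0) ((t ++ [p]).getD j 0) +
        pvCell m ((t ++ [p]).getD j 0) ((t ++ [p]).getD i 0))).sum)).sum = 0 := by
    simp
  rw [hlast, add_zero]
  have hmain : ∀ i ∈ List.range t.length,
      ((List.range' (i + 1) (t.length + 1 - (i + 1))).map (fun j =>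
        pvCell m ((t ++ [p]).getD i 0) ((t ++ [p]).getD j 0) +
        pvCell m ((t ++ [p]).getD j 0) ((t ++ [p]).getD i 0))).sum
      = ((List.range' (i + 1) (t.length - (i + 1))).map (fun j =>
        pvCell m (t.getD i 0) (t.getD j 0) + pvCell m (t.getD j 0) (t.getD i 0))).sum
        + (pvCell m (t.getD i 0) p + pvCell m p (t.getD i 0)) := by
    intro i hi
    have hi' : i < t.length := List.mem_range.mp hi
    have hgi : (t ++ [p]).getD i 0 = t.getD i 0 := List.getD_append _ _ _ _ hi'
    have hn : t.length + 1 - (i + 1) = (t.length - (i + 1)) + 1 := by omega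
    rw [hn, List.range'_1_concat, List.map_append, List.sum_append]
    have hL : (i + 1) + (t.length - (i + 1)) = t.length := by omega
    rw [hL]
    have hinner : ∀ j ∈ List.range' (i + 1) (t.length - (i + 1)),
        pvCell m ((t ++ [p]).getD i 0) ((t ++ [p]).getD j 0) +
          pvCell m ((t ++ [p]).getD j 0) ((t ++ [p]).getD i 0)
        = pvCell m (t.getD i 0) (t.getD j 0) + pvCell m (t.getD j 0) (t.getD i 0) := by
      intro j hj
      have hj' : j < t.length := by
        have := List.mem_range'_1.mp hj; omega
      rw [hgi, List.getD_append _ _ _ _ hj']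
    rw [List.map_congr_left hinner]
    simp only [List.map_cons, List.map_nil, List.sum_cons, List.sum_nil, add_zero]
    rw [hgi, hgetL]
  rw [List.map_congr_left hmain, PySem.List.sum_map_add_int]
  congr 1
  have := pvMapRangeGetD t (fun q => pvCell m q p + pvCell m p q)
  calc ((List.range t.length).map (fun i => pvCell m (t.getD i 0) p + pvCell m p (t.getD i 0))).sum
      = (t.map (fun q => pvCell m q p + pvCell m p q)).sum := by rw [this]
    _ = (t.map (fun q => pvCell m p q + pvCell m q p)).sum := by
        congr 1; exact List.map_congr_left (fun q _ => add_comm _ _)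

theorem pvMinInf_eq (best : Option Int) (d : Int) :
    (match best with
      | none => some d
      | some b => if d < b then some d else some b) = pvMinInf best d := by
  cases best with
  | none => rfl
  | some b =>
      simp only [pvMinInf]
      rcases lt_or_ge d b with h | h
      · rw [if_pos h]; simp [min_def]; omega
      · rw [if_neg (by omega)]; simp [min_def]; omega

theorem pvDfs_spec (m : List (List Int)) (n k : Int) :
    ∀ (fuel : Nat) (i : Int) (t1 t2 : List Int) (best : Option Int),
      i = (t1.length : Int) + t2.length →
      (t1.length : Int) ≤ k → (t2.length : Int) ≤ n - k →
      (t1.length : Int) + t2.length + fuel = n →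
      pvDfs m n k fuel i t1 t2 (pvCalcTeamA t1 m) (pvCalcTeamA t2 m) best
        = (pvSplits i fuel).foldl
            (fun acc s => if ((t1.length : Int) + s.1.length = k) then
                pvMinInf acc (|pvCalcTeamA (t1 ++ s.1) m - pvCalcTeamA (t2 ++ s.2) m|)
              else acc) best := by
  intro fuel
  induction fuel with
  | zero =>
      intro i t1 t2 best hi h1 h2 hsum
      push_cast at hsum
      have hin : i = n := by omega
      rw [pvDfs.eq_def]; simp only [if_pos hin]
      simp only [pvSplits, List.foldl_cons, List.foldl_nil]
      rw [if_pos (by simp; omega)]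
      simp only [List.append_nil]
      exact pvMinInf_eq best _
  | succ fuel ih =>
      intro i t1 t2 best hi h1 h2 hsum
      push_cast at hsum
      have hne : ¬ (i = n) := by omega
      rw [pvDfs.eq_def]; simp only [if_neg hne]
      simp only [pvSplits, List.foldl_append, List.foldl_map]
      have hInc : (if (t1.length : Int) < k then
            pvDfs m n k fuel (i + 1) (t1 ++ [i]) t2 (pvCalcTeamA t1 m + pvGain m i t1)
              (pvCalcTeamA t2 m) best
          else best)
          = List.foldl
              (fun x y =>
                if (t1.length : Int) + ((i :: y.1).length : Int) = k then
                  pvMinInf x |pvCalcTeamA (t1 ++ i :: y.1) m - pvCalcTeamA (t2 ++ y.2) m|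
                else x)
              best (pvSplits (i + 1) fuel) := by
        by_cases hb1 : (t1.length : Int) < k
        · rw [if_pos hb1]
          have h := ih (i + 1) (t1 ++ [i]) t2 best (by simp; omega)
            (by simp; omega) h2 (by simp; omega)
          rw [pvCalcTeamA_append] at h
          rw [h]
          apply PySem.List.foldl_congr_mem
          intro acc s hs
          rw [show (t1 ++ [i]) ++ s.1 = t1 ++ i :: s.1 from by simp]
          exact if_congr (by push_cast [List.length_append, List.length_cons, List.length_nil]; constructor <;> intro <;> omega) rfl rfl
        · rw [if_neg hb1]
          have ht1 : (t1.length : Int) = k := by omega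
          symm
          rw [PySem.List.foldl_congr_mem _ _ (fun acc _ => acc) _ (by
            intro acc s hs
            rw [if_neg (by push_cast [List.length_cons]; omega)])]
          exact PySem.List.foldl_ignore _ _
      have hExc : ∀ b, (if (t2.length : Int) < n - k then
            pvDfs m n k fuel (i + 1) t1 (t2 ++ [i]) (pvCalcTeamA t1 m)
              (pvCalcTeamA t2 m + pvGain m i t2) b
          else b)
          = List.foldl
              (fun x y =>
                if (t1.length : Int) + (y.1.length : Int) = k then
                  pvMinInf x |pvCalcTeamA (t1 ++ y.1) m - pvCalcTeamA (t2 ++ i :: y.2) m|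
                else x)
              b (pvSplits (i + 1) fuel) := by
        intro b
        by_cases hb2 : (t2.length : Int) < n - k
        · rw [if_pos hb2]
          have h := ih (i + 1) t1 (t2 ++ [i]) b (by simp; omega) h1
            (by simp; omega) (by simp; omega)
          rw [pvCalcTeamA_append] at h
          rw [h]
          apply PySem.List.foldl_congr_mem
          intro acc s hs
          rw [show (t2 ++ [i]) ++ s.2 = t2 ++ i :: s.2 from by simp]
        · rw [if_neg hb2]
          have ht2 : (t2.length : Int) = n - k := by omega
          symm
          rw [PySem.List.foldl_congr_mem _ _ (fun acc _ => acc) _ (by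
            intro acc s hs
            have hs' := pvSplits_len fuel (i + 1) s hs
            rw [if_neg (by omega)])]
          exact PySem.List.foldl_ignore _ _
      rw [hExc, hInc]

theorem pvSplits_eq_combos : ∀ (r : Nat) (i : Int) (j : Nat) (g : List Int → List Int → Int),
    ((pvSplits i r).filter (fun s => decide (s.1.length = j))).map (fun s => g s.1 s.2)
      = (pvCombosA (pvRangeI i r) j).map
          (fun S => g S ((pvRangeI i r).filter (fun p => !(S.contains p)))) := by
  intro r
  induction r with
  | zero =>
      intro i j g
      cases j with
      | zero => simp [pvSplits, pvCombosA, pvRangeI]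
      | succ j => simp [pvSplits, pvCombosA, pvRangeI]
  | succ r ih =>
      intro i j g
      have hmem : ∀ x ∈ pvRangeI (i + 1) r, i + 1 ≤ x :=
        fun x hx => (mem_pvRangeI r (i + 1) x hx).1
      cases j with
      | zero =>
          have hIH := ih (i + 1) 0 (fun x y => g x (i :: y))
          simp only [pvSplits, pvRangeI, pvCombosA, List.filter_append, List.filter_map,
            List.map_append, List.map_map] at hIH ⊢
          rw [show ((fun s : List Int × List Int => decide (s.1.length = 0)) ∘
              fun s : List Int × List Int => (i :: s.1, s.2))
              = fun s : List Int × List Int => false from by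
            funext s; simp]
          rw [show ((fun s : List Int × List Int => decide (s.1.length = 0)) ∘
              fun s : List Int × List Int => (s.1, i :: s.2))
              = fun s : List Int × List Int => decide (s.1.length = 0) from rfl]
          simp only [List.filter_false, List.map_nil, List.nil_append]
          rw [show ((fun s : List Int × List Int => g s.1 s.2) ∘
              fun s : List Int × List Int => (s.1, i :: s.2))
              = fun s : List Int × List Int => g s.1 (i :: s.2) from rfl]
          rw [hIH]
          simp [List.filter_cons]
      | succ j =>
          have hIH1 := ih (i + 1) j (fun x y => g (i :: x) y)
          have hIH2 := ih (i + 1) (j + 1) (fun x y => g x (i :: y))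
          simp only [pvSplits, pvRangeI, pvCombosA, List.filter_append, List.filter_map,
            List.map_append, List.map_map] at hIH1 hIH2 ⊢
          congr 1
          · rw [show ((fun s : List Int × List Int => decide (s.1.length = j + 1)) ∘
                fun s : List Int × List Int => (i :: s.1, s.2))
                = fun s : List Int × List Int => decide (s.1.length = j) from by
              funext s; simp]
            rw [show ((fun s : List Int × List Int => g s.1 s.2) ∘
                fun s : List Int × List Int => (i :: s.1, s.2))
                = fun s : List Int × List Int => g (i :: s.1) s.2 from rfl]
            rw [hIH1]
            apply List.map_congr_left
            intro S hS
            simp only [Function.comp]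
            congr 1
            rw [List.filter_cons]
            have hci : (!((i :: S).contains i)) = false := by simp
            rw [hci, if_neg (by simp)]
            apply List.filter_congr
            intro p hp
            have hpi : ¬ (p = i) := by have := hmem p hp; omega
            simp [hpi]
          · rw [show ((fun s : List Int × List Int => decide (s.1.length = j + 1)) ∘
                fun s : List Int × List Int => (s.1, i :: s.2))
                = fun s : List Int × List Int => decide (s.1.length = j + 1) from by
              funext s; simp]
            rw [show ((fun s : List Int × List Int => g s.1 s.2) ∘
                fun s : List Int × List Int => (s.1, i :: s.2))
                = fun s : List Int × List Int => g s.1 (i :: s.2) from rfl]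
            rw [hIH2]
            apply List.map_congr_left
            intro S hS
            rw [List.filter_cons]
            have hci : ((S.contains i)) = false := by
              by_contra h
              have : i ∈ S := by simpa using h
              have := hmem i (mem_pvCombosA _ _ _ _ hS this)
              omega
            have hni : i ∉ S := by simpa using hci
            simp [hni]

-- ===== VERDICT (by name: the statement is the Claim_ definition above) =====
theorem find_min_ability_diff_spec : Claim_equal_find_min_ability_diff := by
  intro n m hdom hpre
  obtain ⟨hn, -⟩ := hpre
  unfold Spec_find_min_ability_diff
  have hk2 : PySem.Int.floordiv n 2 = n / 2 := PySem.Int.floordiv_eq_ediv_of_pos (by omega)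
  have hk0 : 0 ≤ PySem.Int.floordiv n 2 := by rw [hk2]; omega
  have hkn : PySem.Int.floordiv n 2 ≤ n := by rw [hk2]; omega
  have hplayers : PySem.List.pyRange 0 n 1 = pvRangeI 0 n.toNat := by
    have h := pvRangeI_eq_pyRange n.toNat 0
    rw [show (0 : Int) + (n.toNat : Int) = n from by omega] at h
    exact h
  simp only [find_min_ability_diff, find_min_ability_diff_alt]
  rw [if_neg (not_lt.mpr hk0), hplayers]
  congr 1
  -- B side: evaluate the DFS via its invariant
  have hdfs := pvDfs_spec m n (PySem.Int.floordiv n 2) n.toNat 0 [] [] none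
    (by simp) (by simpa using hk0) (by simp; omega) (by simp; omega)
  rw [pvCalcTeamA_nil] at hdfs
  simp only [List.nil_append, List.length_nil, Nat.cast_zero, zero_add] at hdfs
  rw [hdfs]
  -- turn the Int-valued size test into the Nat test k.toNat
  have hswap : List.foldl (fun acc s => if ((s.1.length : Int) = PySem.Int.floordiv n 2) then
        pvMinInf acc (|pvCalcTeamA s.1 m - pvCalcTeamA s.2 m|) else acc)
      (none : Option Int) (pvSplits 0 n.toNat)
      = List.foldl (fun acc s => if s.1.length = (PySem.Int.floordiv n 2).toNat then
        pvMinInf acc (|pvCalcTeamA s.1 m - pvCalcTeamA s.2 m|) else acc)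
      (none : Option Int) (pvSplits 0 n.toNat) :=
    PySem.List.foldl_congr_mem _ _ _ _ (fun acc s _ => if_congr (by omega) rfl rfl)
  rw [hswap]
  rw [PySem.List.foldl_ite_eq_foldl_filter
    (fun s : List Int × List Int => s.1.length = (PySem.Int.floordiv n 2).toNat)
    (fun acc s => pvMinInf acc (|pvCalcTeamA s.1 m - pvCalcTeamA s.2 m|))]
  have hlist := pvSplits_eq_combos n.toNat 0 (PySem.Int.floordiv n 2).toNat
    (fun x y => |pvCalcTeamA x m - pvCalcTeamA y m|)

  rw [← List.foldl_map (f := fun s : List Int × List Int =>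
      |pvCalcTeamA s.1 m - pvCalcTeamA s.2 m|) (g := pvMinInf), hlist, List.foldl_map]
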